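-- pv_equiv track=rewrite | github.com/derekmetcalf/nn-sapt | nn-ai-ff/routines3.py | create_atype_list
-- ===== SOURCE A (Python) =====
-- def create_atype_list(aname, atomic_dict):
--     """
--     creates a lookup list of unique element indices
--     """
--     index=0
--     # fill in first type
--     atype=[]
--     atypename=[]
--     atype.append(index)
--     atypename.append(aname[index])
--
--     for i in range(1, len(aname)):
--         # find first match
--         flag=-1
--         for j in range(i):
--             if aname[i] == aname[j]:
--                flag=atype[j]
--         if flag == -1:
--             index+=1
--             atype.append(index)
--             atypename.append(aname[i])
--         else:
--             atype.append( flag )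
--     atomic_number=[]
--     for i in range(len(atypename)):
--         atomic_number.append(atomic_dict.get(atypename[i],'none'))
--     ntype = index + 1
--     return ntype, atype, atypename, atomic_number
-- ===== SOURCE B (Python) =====
-- def create_atype_list(aname, atomic_dict):
--     """
--     creates a lookup list of unique element indices
--     (two-pass: build the unique-name table first, then map)
--     """
--     seen = {}
--     atypename = []
--     for name in aname:
--         if name not in seen:
--             seen[name] = len(atypename)
--             atypename.append(name)
--     atype = [seen[name] for name in aname]
--     atomic_number = [atomic_dict.get(n, 'none') for n in atypename]
--     return len(atypename), atype, atypename, atomic_number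
-- ===== Notes on version B (the rewrite author's own statement) =====
-- stated objective: simpler
-- what changed: Replaces A's quadratic nested first-match scan with one dict-building pass over the names followed by two independent mapping comprehensions (index lookup and atomic-number lookup).
-- crash fix: On empty aname A raises IndexError (aname[0] before the loop) while B returns (0, [], [], []). — e.g. on create_atype_list([], [("H", "1")]): A raises IndexError, B returns (0, [], [], [])
import Mathlib
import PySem

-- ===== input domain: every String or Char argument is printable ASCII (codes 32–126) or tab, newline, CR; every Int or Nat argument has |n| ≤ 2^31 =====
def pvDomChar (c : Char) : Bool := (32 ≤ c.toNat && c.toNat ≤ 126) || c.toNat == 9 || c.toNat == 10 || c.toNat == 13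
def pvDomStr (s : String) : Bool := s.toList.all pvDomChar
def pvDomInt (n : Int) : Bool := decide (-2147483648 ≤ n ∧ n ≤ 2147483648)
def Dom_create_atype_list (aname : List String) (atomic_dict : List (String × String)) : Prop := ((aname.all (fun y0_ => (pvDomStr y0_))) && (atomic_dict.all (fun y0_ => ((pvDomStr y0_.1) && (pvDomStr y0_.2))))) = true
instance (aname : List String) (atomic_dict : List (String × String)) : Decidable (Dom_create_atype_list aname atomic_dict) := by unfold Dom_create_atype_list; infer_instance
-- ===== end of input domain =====

-- B replaces A's quadratic nested first-match scan with one dict-building pass and two mapping passes (simpler/faster);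
-- on empty aname A raises IndexError while B returns (0, [], [], []) — see Raises_/Pre_ below.

-- ===== PORT A =====
-- outer-loop body of A: for i in range(1, len(aname)): flag = last matching atype[j] (or -1); extend state
def pvStepA (aname : List String) (st : Int × List Int × List String) (i : Int) :
    Int × List Int × List String :=
  let index := st.1
  let atype := st.2.1
  let atypename := st.2.2
  let flag := (PySem.List.pyRange 0 i 1).foldl
    (fun flag j =>
      if PySem.List.pyGetD aname i "" = PySem.List.pyGetD aname j "" then
        PySem.List.pyGetD atype j 0
      else flag) (-1)
  if flag = -1 then
    (index + 1, atype ++ [index + 1], atypename ++ [PySem.List.pyGetD aname i ""])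
  else
    (index, atype ++ [flag], atypename)

def create_atype_list (aname : List String) (atomic_dict : List (String × String)) :
    Int × List Int × List String × List String :=
  let index : Int := 0
  let atype : List Int := [] ++ [index]
  let atypename : List String := [] ++ [PySem.List.pyGetD aname 0 ""]   -- aname[0]: in range on Pre_ (aname ≠ [])
  let st := (PySem.List.pyRange 1 (aname.length : Int) 1).foldl (pvStepA aname) (index, atype, atypename)
  let atomic_number := (PySem.List.pyRange 0 (st.2.2.length : Int) 1).foldl
    (fun acc i => acc ++ [PySem.Dict.getD (PySem.Dict.mk atomic_dict) (PySem.List.pyGetD st.2.2 i "") "none"]) []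
  (st.1 + 1, st.2.1, st.2.2, atomic_number)

-- ===== PORT B =====
-- first pass of B: build (seen, atypename)
def pvStepB (st : PySem.Dict String Int × List String) (name : String) :
    PySem.Dict String Int × List String :=
  if st.1.contains name then st
  else (st.1.insert name (st.2.length : Int), st.2 ++ [name])

def create_atype_list_alt (aname : List String) (atomic_dict : List (String × String)) :
    Int × List Int × List String × List String :=
  let st := aname.foldl pvStepB (PySem.Dict.empty, [])
  let atype := aname.map (fun name => PySem.Dict.getD st.1 name 0)   -- seen[name]: always present
  let atypename := st.2
  let atomic_number := atypename.map (fun n => PySem.Dict.getD (PySem.Dict.mk atomic_dict) n "none")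
  ((atypename.length : Int), atype, atypename, atomic_number)

-- ===== PRECONDITION & SPEC =====
-- Pre_ excludes only the empty name list, on which A raises IndexError at aname[0].
def Pre_create_atype_list (aname : List String) (atomic_dict : List (String × String)) : Prop :=
  aname ≠ []
instance (aname : List String) (atomic_dict : List (String × String)) : Decidable (Pre_create_atype_list aname atomic_dict) := by unfold Pre_create_atype_list; infer_instance
def pvWitness_create_atype_list : List String × (List (String × String)) :=
  (["C", "H", "C", "O"], [("C", "6"), ("H", "1")])

-- On empty aname A raises IndexError (aname[0] before the loop) while B returns (0, [], [], []).
def Raises_create_atype_list (aname : List String) (atomic_dict : List (String × String)) : Prop :=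
  aname = []
instance (aname : List String) (atomic_dict : List (String × String)) : Decidable (Raises_create_atype_list aname atomic_dict) := by unfold Raises_create_atype_list; infer_instance
def pvRaiseWitness_create_atype_list : List String × (List (String × String)) := ([], [("H", "1")])
def pvRaiseWitnessOut_create_atype_list : Int × List Int × List String × List String := (0, [], [], [])

def Spec_create_atype_list (aname : List String) (atomic_dict : List (String × String)) (out : Int × List Int × List String × List String) : Prop := out = create_atype_list_alt aname atomic_dict
instance (aname : List String) (atomic_dict : List (String × String)) (out : Int × List Int × List String × List String) : Decidable (Spec_create_atype_list aname atomic_dict out) := by unfold Spec_create_atype_list; infer_instance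

-- ===== CLAIM (what is proved, stated in full; the proofs are below) =====
def Claim_equal_create_atype_list : Prop := ∀ (aname : List String) (atomic_dict : List (String × String)), Dom_create_atype_list aname atomic_dict → Pre_create_atype_list aname atomic_dict → Spec_create_atype_list aname atomic_dict (create_atype_list aname atomic_dict)
def Claim_raises_create_atype_list : Prop := (∀ (aname : List String) (atomic_dict : List (String × String)), Dom_create_atype_list aname atomic_dict → Raises_create_atype_list aname atomic_dict → ¬ Pre_create_atype_list aname atomic_dict) ∧ (Dom_create_atype_list (pvRaiseWitness_create_atype_list.1) (pvRaiseWitness_create_atype_list.2) ∧ Raises_create_atype_list (pvRaiseWitness_create_atype_list.1) (pvRaiseWitness_create_atype_list.2) ∧ create_atype_list_alt (pvRaiseWitness_create_atype_list.1) (pvRaiseWitness_create_atype_list.2) = pvRaiseWitnessOut_create_atype_list)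

-- ===== LEMMAS AND PROOFS =====

def pvIdx (aname : List String) (s : String) : Int :=
  ((PySem.List.dedup aname).idxOf s : Int)

theorem pv_foldl_if_const {α : Type} [DecidableEq α] (l : List α) (x : α) (c init : Int) :
    l.foldl (fun acc s => if x = s then c else acc) init =
      if x ∈ l then c else init := by
  induction l generalizing init with
  | nil => simp
  | cons a t ih =>
    simp only [List.foldl_cons, ih, List.mem_cons]
    by_cases hxa : x = a <;> simp [hxa]

theorem pv_dedup_prefix (p q : List String) :
    ∃ r, PySem.List.dedup (p ++ q) = PySem.List.dedup p ++ r := by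
  simp only [PySem.List.dedup_eq_ofList, PySem.Set.ofList_append,
    PySem.Set.update_eq_append_filter]
  exact ⟨_, rfl⟩

-- pvIdx agrees with the index inside the dedup of any prefix containing s
theorem pv_idx_take (aname : List String) (m : Nat) (s : String)
    (h : s ∈ PySem.List.dedup (aname.take m)) :
    pvIdx aname s = (((PySem.List.dedup (aname.take m)).idxOf s : Nat) : Int) := by
  obtain ⟨r, hr⟩ := pv_dedup_prefix (aname.take m) (aname.drop m)
  rw [List.take_append_drop] at hr
  rw [pvIdx, hr, List.idxOf_append_of_mem h]

theorem pv_idx_nonneg (aname : List String) (s : String) : 0 ≤ pvIdx aname s := by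
  exact Int.natCast_nonneg _

theorem pvA_loop (aname : List String) (ha : aname ≠ []) :
    ∀ m : Nat, 1 ≤ m → m ≤ aname.length →
    (PySem.List.pyRange 1 (m : Int) 1).foldl (pvStepA aname)
        (0, [] ++ [(0 : Int)], [] ++ [PySem.List.pyGetD aname 0 ""]) =
      (((PySem.List.dedup (aname.take m)).length : Int) - 1,
       (aname.take m).map (pvIdx aname),
       PySem.List.dedup (aname.take m)) := by
  intro m hm
  induction m, hm using Nat.le_induction with
  | base =>
    intro h1
    obtain ⟨a, rest, rfl⟩ : ∃ a rest, aname = a :: rest := by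
      cases aname with
      | nil => exact absurd rfl ha
      | cons a rest => exact ⟨a, rest, rfl⟩
    have h0 : PySem.List.pyGetD (a :: rest) ((0:Nat) : Int) "" = a := by
      rw [PySem.List.pyGetD_natCast]; rfl
    rw [PySem.List.pyRange_one_eq_nil (by norm_num)]
    simp [pvIdx, PySem.List.dedup_eq_ofList, PySem.Set.ofList_cons,
      PySem.List.pyGetD, PySem.Set.discard]
  | succ m hm ih =>
    intro hle
    have hmn : m < aname.length := by omega
    have hc1 : ((m+1 : Nat) : Int) = ((m : Nat) : Int) + 1 := by push_cast; ring
    rw [hc1, PySem.List.pyRange_one_succ_right (by exact_mod_cast hm), List.foldl_append,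
      ih (by omega)]
    have hxm : PySem.List.pyGetD aname ((m : Nat) : Int) "" = aname[m] := by
      rw [PySem.List.pyGetD_natCast, List.getD_eq_getElem _ _ hmn]
    have hlen : (aname.take m).length = m := by simp [List.length_take]; omega
    have hinner :
        (PySem.List.pyRange 0 ((m : Nat) : Int) 1).foldl
          (fun flag j =>
            if aname[m] = PySem.List.pyGetD aname j "" then
              PySem.List.pyGetD ((aname.take m).map (pvIdx aname)) j 0
            else flag) (-1)
          = if aname[m] ∈ aname.take m then pvIdx aname aname[m] else -1 := by
      rw [PySem.List.foldl_congr_mem _ _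
        (fun flag j => if aname[m] = PySem.List.pyGetD (aname.take m) j "" then pvIdx aname aname[m] else flag) _ ?_]
      · have hb : ((m : Nat) : Int) = (((aname.take m).length : Nat) : Int) := by rw [hlen]
        rw [hb, PySem.List.foldl_pyRange_zero_pyGetD' (aname.take m) ""
          (fun flag s => if aname[m] = s then pvIdx aname aname[m] else flag) (-1),
          pv_foldl_if_const]
      · intro acc j hj
        rw [PySem.List.mem_pyRange_one] at hj
        obtain ⟨k, rfl⟩ : ∃ k : Nat, j = (k : Int) := ⟨j.toNat, (Int.toNat_of_nonneg hj.1).symm⟩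
        have hkm : k < m := by exact_mod_cast hj.2
        have h1 : PySem.List.pyGetD aname (k : Int) "" = aname[k] := by
          rw [PySem.List.pyGetD_natCast, List.getD_eq_getElem _ _ (by omega)]
        have h2 : PySem.List.pyGetD (aname.take m) (k : Int) "" = aname[k] := by
          rw [PySem.List.pyGetD_natCast, List.getD_eq_getElem _ _ (by rw [hlen]; omega)]
          simp
        have h3 : PySem.List.pyGetD ((aname.take m).map (pvIdx aname)) (k : Int) 0
            = pvIdx aname aname[k] := by
          rw [PySem.List.pyGetD_natCast, List.getD_eq_getElem _ _ (by simp; omega)]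
          simp
        simp only [h1]
        show _ = if aname[m] = PySem.List.pyGetD (aname.take m) ((k : Nat) : Int) "" then pvIdx aname aname[m] else acc
        rw [h2, h3]
        by_cases he : aname[m] = aname[k]
        · rw [he]
        · rw [if_neg he, if_neg he]
    unfold pvStepA
    simp only [List.foldl_cons, List.foldl_nil, hinner, hxm]
    by_cases hx : aname[m] ∈ aname.take m
    · have hge := pv_idx_nonneg aname aname[m]
      rw [if_pos hx, if_neg (by omega)]
      have htake : aname.take (m+1) = aname.take m ++ [aname[m]] := by
        rw [← List.take_concat_get hmn, List.concat_eq_append]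
      have hded : PySem.List.dedup (aname.take m ++ [aname[m]]) = PySem.List.dedup (aname.take m) := by
        simp only [PySem.List.dedup_eq_ofList, PySem.Set.ofList_append_singleton]
        exact PySem.Set.add_of_mem (by simp [PySem.Set.mem_ofList, hx])
      rw [htake, hded, List.map_append]
      simp

    · rw [if_neg hx, if_pos rfl]
      have htake : aname.take (m+1) = aname.take m ++ [aname[m]] := by
        rw [← List.take_concat_get hmn, List.concat_eq_append]
      have hnm : aname[m] ∉ PySem.List.dedup (aname.take m) := by
        simp only [PySem.List.dedup_eq_ofList, PySem.Set.mem_ofList]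
        exact hx
      have hded : PySem.List.dedup (aname.take m ++ [aname[m]])
          = PySem.List.dedup (aname.take m) ++ [aname[m]] := by
        simp only [PySem.List.dedup_eq_ofList, PySem.Set.ofList_append_singleton]
        exact PySem.Set.add_of_not_mem hnm
      have hidx : pvIdx aname aname[m]
          = (((PySem.List.dedup (aname.take m)).length : Nat) : Int) := by
        rw [pv_idx_take aname (m+1) aname[m] (by rw [htake, hded]; simp), htake, hded,
          List.idxOf_append_of_notMem hnm]
        simp
      rw [htake, hded, List.map_append]
      refine Prod.ext ?_ (Prod.ext ?_ ?_)
      · simp only [List.length_append, List.length_cons, List.length_nil]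
        push_cast
        ring
      · simp only [List.map_cons, List.map_nil]
        rw [hidx]
        congr 2
        omega
      · rfl

theorem pvB_loop (l : List String) (d : PySem.Dict String Int) (t : List String)
    (hnd : t.Nodup)
    (hc : ∀ s, d.contains s = true ↔ s ∈ t)
    (hg : ∀ s ∈ t, d.get? s = some ((t.idxOf s : Nat) : Int)) :
    (l.foldl pvStepB (d, t)).2 = PySem.Set.update t l ∧
    (PySem.Set.update t l).Nodup ∧
    (∀ s ∈ PySem.Set.update t l, (l.foldl pvStepB (d, t)).1.get? s = some (((PySem.Set.update t l).idxOf s : Nat) : Int)) := by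
  induction l generalizing d t with
  | nil =>
    refine ⟨rfl, hnd, ?_⟩
    intro s hs
    exact hg s hs
  | cons x l ih =>
    simp only [List.foldl_cons, PySem.Set.update_cons]
    by_cases hx : x ∈ t
    · have hcx : d.contains x = true := (hc x).mpr hx
      have hstep : pvStepB (d, t) x = (d, t) := by simp [pvStepB, hcx]
      rw [hstep, PySem.Set.add_of_mem hx]
      exact ih d t hnd hc hg
    · have hcx : d.contains x = false := by
        by_contra h
        exact hx ((hc x).mp (by simpa using h))
      have hstep : pvStepB (d, t) x = (d.insert x (t.length : Int), t ++ [x]) := by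
        simp [pvStepB, hcx]
      rw [hstep, PySem.Set.add_of_not_mem hx]
      refine ih _ _ ?_ ?_ ?_
      · simp [List.nodup_append, hnd]
        intro a ha hax
        exact hx (hax ▸ ha)
      · intro s
        simp [PySem.Dict.contains_insert, hc s, or_comm]
      · intro s hs
        rcases List.mem_append.mp hs with hst | hsx
        · have hne : s ≠ x := fun h => hx (h ▸ hst)
          rw [PySem.Dict.get?_insert_of_ne _ _ hne, hg s hst,
            List.idxOf_append_of_mem hst]
        · have hsx' : s = x := by simpa using hsx
          subst hsx'
          rw [PySem.Dict.get?_insert_self, List.idxOf_append_of_notMem hx]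
          simp

-- ===== VERDICT (by name: the statement is the Claim_ definition above) =====
theorem create_atype_list_spec : Claim_equal_create_atype_list := by
  intro aname atomic_dict _ hpre
  unfold Spec_create_atype_list
  have hn : 1 ≤ aname.length := by
    cases aname with
    | nil => exact absurd rfl hpre
    | cons a t => simp
  have hA := pvA_loop aname hpre aname.length hn le_rfl
  rw [List.take_length] at hA
  have hB := pvB_loop aname PySem.Dict.empty [] (by simp)
    (by intro s; simp [PySem.Dict.contains_empty])
    (by intro s hs; simp at hs)
  rw [PySem.Set.update_nil_left] at hB
  obtain ⟨h2, _, hget⟩ := hB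
  simp only [create_atype_list, create_atype_list_alt]
  rw [hA, h2]
  refine Prod.ext ?_ (Prod.ext ?_ (Prod.ext ?_ ?_))
  · simp only [PySem.List.dedup_eq_ofList]
    ring
  · simp only
    refine (List.map_congr_left ?_)
    intro s hs
    rw [PySem.Dict.getD_eq_get?_getD, hget s (by simp [PySem.Set.mem_ofList, hs])]
    simp [pvIdx]
  · simp [PySem.List.dedup_eq_ofList]
  · simp only
    rw [PySem.List.foldl_pyRange_zero_pyGetD' (PySem.List.dedup aname) ""
      (fun acc s => acc ++ [PySem.Dict.getD (PySem.Dict.mk atomic_dict) s "none"]) [],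
      PySem.List.foldl_append_singleton_eq_map]
    simp

@[simp] theorem create_atype_list_raises : Claim_raises_create_atype_list := by
  unfold Claim_raises_create_atype_list
  exact ⟨fun a d _ hr hp => hp hr, by decide⟩
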